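-- pv_equiv track=rewrite | github.com/edinichka123/gastroguide-ai | app.py | categorize_ingredients
-- ===== SOURCE A (Python) =====
-- INGREDIENT_CATEGORIES = {
--     "chicken": "protein",
--     "beef": "protein",
--     "eggs": "protein",
--     "tofu": "protein",
--
--     "rice": "carb",
--     "pasta": "carb",
--     "potatoes": "carb",
--     "bread": "carb",
--
--     "broccoli": "veggie",
--     "carrot": "veggie",
--     "onion": "veggie",
--     "tomato": "veggie",
--
--     "soy sauce": "sauce",
--     "garlic": "spice",
--     "olive oil": "fat",
-- }
--
-- def categorize_ingredients(ingredients):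
--     categorized = {
--         "protein": [],
--         "carb": [],
--         "veggie": [],
--         "sauce": [],
--         "spice": [],
--         "fat": [],
--         "other": []
--     }
--     for item in ingredients:
--         category = INGREDIENT_CATEGORIES.get(item, "other")
--         categorized[category].append(item)
--     return categorized
-- ===== SOURCE B (Python) =====
-- INGREDIENT_CATEGORIES = {
--     "chicken": "protein",
--     "beef": "protein",
--     "eggs": "protein",
--     "tofu": "protein",
--
--     "rice": "carb",
--     "pasta": "carb",
--     "potatoes": "carb",
--     "bread": "carb",
--
--     "broccoli": "veggie",
--     "carrot": "veggie",
--     "onion": "veggie",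
--     "tomato": "veggie",
--
--     "soy sauce": "sauce",
--     "garlic": "spice",
--     "olive oil": "fat",
-- }
--
-- def categorize_ingredients(ingredients):
--     items = list(ingredients)
--     return {
--         category: [item for item in items
--                    if INGREDIENT_CATEGORIES.get(item, "other") == category]
--         for category in ("protein", "carb", "veggie", "sauce", "spice", "fat", "other")
--     }
-- ===== Notes on version B (the rewrite author's own statement) =====
-- stated objective: alternative
-- what changed: Replaces A's mutable pre-seeded dict with one dispatch-append pass by a dict comprehension over the fixed category list, building each bucket with a filtering comprehension (one scan per category).
import Mathlib
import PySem

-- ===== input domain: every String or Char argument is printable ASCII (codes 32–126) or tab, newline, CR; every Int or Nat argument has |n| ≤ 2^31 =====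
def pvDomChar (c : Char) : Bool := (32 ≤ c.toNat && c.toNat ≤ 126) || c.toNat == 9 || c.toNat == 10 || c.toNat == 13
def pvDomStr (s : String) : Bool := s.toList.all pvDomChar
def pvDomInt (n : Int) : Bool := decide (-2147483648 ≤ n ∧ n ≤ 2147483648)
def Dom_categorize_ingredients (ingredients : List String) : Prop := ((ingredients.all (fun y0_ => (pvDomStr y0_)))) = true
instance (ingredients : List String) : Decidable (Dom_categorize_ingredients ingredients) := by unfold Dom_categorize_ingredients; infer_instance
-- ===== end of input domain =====

-- B replaces A's single mutable-dict dispatch pass by a map over the fixed category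
-- list with one filtering scan per bucket (alternative decomposition, same results).

-- ===== PORT A =====
def pvING : PySem.Dict String String := PySem.Dict.ofList
  [("chicken","protein"),("beef","protein"),("eggs","protein"),("tofu","protein"),
   ("rice","carb"),("pasta","carb"),("potatoes","carb"),("bread","carb"),
   ("broccoli","veggie"),("carrot","veggie"),("onion","veggie"),("tomato","veggie"),
   ("soy sauce","sauce"),("garlic","spice"),("olive oil","fat")]

def categorize_ingredients (ingredients : List String) : List (String × List String) :=
  (ingredients.foldl
    (fun d item => d.modify (pvING.getD item "other") [] (· ++ [item]))
    (PySem.Dict.ofList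
      [("protein",[]),("carb",[]),("veggie",[]),("sauce",[]),("spice",[]),("fat",[]),("other",[])])).items

-- ===== PORT B =====
def pvCats : List String := ["protein","carb","veggie","sauce","spice","fat","other"]

def categorize_ingredients_alt (ingredients : List String) : List (String × List String) :=
  pvCats.map (fun c => (c, ingredients.filter (fun item => pvING.getD item "other" == c)))

-- ===== PRECONDITION & SPEC =====
def Spec_categorize_ingredients (ingredients : List String) (out : List (String × List String)) : Prop := out = categorize_ingredients_alt ingredients
instance (ingredients : List String) (out : List (String × List String)) : Decidable (Spec_categorize_ingredients ingredients out) := by unfold Spec_categorize_ingredients; infer_instance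

-- ===== CLAIM (what is proved, stated in full; the proofs are below) =====
def Claim_equal_categorize_ingredients : Prop := ∀ (ingredients : List String), Dom_categorize_ingredients ingredients → Spec_categorize_ingredients ingredients (categorize_ingredients ingredients)

-- ===== LEMMAS AND PROOFS =====

-- the category assigned to any item is one of the seven fixed categories
lemma catOf_mem (i : String) : pvING.getD i "other" ∈ pvCats := by
  rcases h : pvING.get? i with _ | v
  · rw [PySem.Dict.getD_of_get?_eq_none pvING "other" h]; decide
  · rw [PySem.Dict.getD_of_get?_eq_some pvING "other" h]
    have hm := PySem.Dict.mem_items_of_get?_eq_some (d := pvING) h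
    have : pvING.items = [("chicken","protein"),("beef","protein"),("eggs","protein"),
      ("tofu","protein"),("rice","carb"),("pasta","carb"),("potatoes","carb"),("bread","carb"),
      ("broccoli","veggie"),("carrot","veggie"),("onion","veggie"),("tomato","veggie"),
      ("soy sauce","sauce"),("garlic","spice"),("olive oil","fat")] := by decide
    rw [this] at hm
    simp only [List.mem_cons, List.not_mem_nil, or_false] at hm
    rcases hm with h'|h'|h'|h'|h'|h'|h'|h'|h'|h'|h'|h'|h'|h'|h' <;>
      (injection h' with _ hv; subst hv; decide)

lemma foldl_modify_getD (l : List String) (d : PySem.Dict String (List String)) (c : String) :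
    (l.foldl (fun d item => d.modify (pvING.getD item "other") [] (· ++ [item])) d).getD c []
      = d.getD c [] ++ l.filter (fun item => pvING.getD item "other" == c) := by
  induction l generalizing d with
  | nil => simp
  | cons x xs ih =>
    rw [List.foldl_cons, ih, PySem.Dict.getD_modify, List.filter_cons]
    by_cases h : pvING.getD x "other" = c
    · simp [h]
    · rw [if_neg (fun hc : c = pvING.getD x "other" => h hc.symm)]
      simp [h]

lemma h_d0_getD (c : String) (hc : c ∈ pvCats) :
    (PySem.Dict.ofList
      ([("protein",[]),("carb",[]),("veggie",[]),("sauce",[]),("spice",[]),("fat",[]),("other",[])] :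
        List (String × List String))).getD c [] = [] := by
  fin_cases hc <;> decide

theorem categorize_ingredients_spec_aux (ingredients : List String) :
    categorize_ingredients ingredients = categorize_ingredients_alt ingredients := by
  unfold categorize_ingredients categorize_ingredients_alt
  set d0 : PySem.Dict String (List String) := PySem.Dict.ofList
      [("protein",[]),("carb",[]),("veggie",[]),("sauce",[]),("spice",[]),("fat",[]),("other",[])] with hd0
  set D := ingredients.foldl
      (fun d item => d.modify (pvING.getD item "other") [] (· ++ [item])) d0 with hD
  have hkeys : D.keys = pvCats := by
    rw [hD, PySem.Dict.keys_foldl_modify_key]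
    have hk0 : d0.keys = pvCats := by decide
    rw [hk0, PySem.Set.update_eq_append_filter]
    have : (PySem.Set.ofList (ingredients.map fun item => pvING.getD item "other")).filter
        (fun y => !(PySem.Set.contains pvCats y)) = [] := by
      apply List.filter_eq_nil_iff.mpr
      intro y hy
      have hy' : y ∈ ingredients.map fun item => pvING.getD item "other" :=
        (PySem.Set.mem_ofList _ _).mp hy
      obtain ⟨i, _, rfl⟩ := List.mem_map.mp hy'
      simp only [Bool.not_eq_eq_eq_not, Bool.not_true, ← Bool.not_eq_true,
        PySem.Set.contains_iff, Decidable.not_not]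
      exact catOf_mem i
    rw [this, List.append_nil]
  have hnd : D.keys.Nodup := by rw [hkeys]; decide
  rw [PySem.Dict.items_eq_map_keys D hnd [], hkeys]
  apply List.map_congr_left
  intro c hc
  rw [hD, foldl_modify_getD, h_d0_getD c hc, List.nil_append]

-- ===== VERDICT (by name: the statement is the Claim_ definition above) =====
theorem categorize_ingredients_spec : Claim_equal_categorize_ingredients := by
  intro ingredients _
  exact categorize_ingredients_spec_aux ingredients
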